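-- pv_equiv track=rewrite | github.com/nurgalive/algorithms-and-data-structures | CtCi/c1_arrays_strings/q1_05_one_way/one_way.py | one_way_simple
-- ===== SOURCE A (Python) =====
-- def one_way_simple(str1: str, str2) -> bool:
--     """
--     My brute force solution.
--     O(s^2) - for every char in the str1 do a loop over str2.
--     """
--
--     long_str = str1 if len(str1) > len(str2) else str2
--     short_str = str1 if len(str1) < len(str2) else str2
--
--     if len(long_str) - len(short_str) > 1:
--         return False
--
--     diff_count = 0
--     for s in long_str:
--         if not find_char(short_str, s):
--             diff_count += 1
--
--     if diff_count > 1: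
--         return False
--     else:
--         return True
--
-- def find_char(string: str, char: str) -> bool:
--     for s in string:
--         if s == char:
--             return True
--     return False
-- ===== SOURCE B (Python) =====
-- def one_way_simple(str1: str, str2) -> bool:
--     """Complement counting: instead of testing every position of the longer
--     string for membership in the shorter one, iterate over the DISTINCT
--     characters of the shorter string, sum their occurrence counts in the
--     longer string (the matched positions), and accept iff at most one
--     position of the longer string is left unmatched."""
--     long_str = str1 if len(str1) > len(str2) else str2
--     short_str = str1 if len(str1) < len(str2) else str2
--
--     if len(long_str) - len(short_str) > 1:
--         return False
--
--     matched = 0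
--     for c in set(short_str):
--         matched += long_str.count(c)
--     return len(long_str) - matched <= 1
-- ===== Notes on version B (the rewrite author's own statement) =====
-- stated objective: faster
-- what changed: Inverts the traversal: instead of scanning every position of the longer string and linearly searching the shorter string for it, B iterates over the distinct characters of the shorter string, sums their occurrence counts in the longer string, and accepts iff the complement len(long) - matched is at most 1.
import Mathlib
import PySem

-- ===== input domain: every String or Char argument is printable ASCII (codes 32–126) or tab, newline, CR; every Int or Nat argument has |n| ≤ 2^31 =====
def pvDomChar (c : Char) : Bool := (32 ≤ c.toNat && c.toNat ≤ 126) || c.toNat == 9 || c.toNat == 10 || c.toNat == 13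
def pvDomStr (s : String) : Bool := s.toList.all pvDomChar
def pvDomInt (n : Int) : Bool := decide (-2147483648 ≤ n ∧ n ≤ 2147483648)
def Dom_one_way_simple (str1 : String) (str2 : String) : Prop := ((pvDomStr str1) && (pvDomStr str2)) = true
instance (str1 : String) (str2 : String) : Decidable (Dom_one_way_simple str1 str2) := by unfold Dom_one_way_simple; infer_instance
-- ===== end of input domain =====

-- B inverts the traversal: instead of scanning the longer string and linearly
-- searching the shorter for each position, it iterates over the distinct
-- characters of the shorter string, sums their occurrence counts in the longer
-- string, and accepts iff the complement (unmatched positions) is at most 1.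

-- ===== PORT A =====
def find_char_go : List Char → Char → Bool
  | [], _ => false
  | s :: rest, char => if s == char then true else find_char_go rest char

def find_char (string : String) (char : Char) : Bool := find_char_go string.toList char

def one_way_simple (str1 : String) (str2 : String) : Bool :=
  let long_str := if PySem.Str.len str1 > PySem.Str.len str2 then str1 else str2
  let short_str := if PySem.Str.len str1 < PySem.Str.len str2 then str1 else str2
  if PySem.Str.len long_str - PySem.Str.len short_str > 1 then false
  else
    let diff_count : Int :=
      long_str.toList.foldl (fun acc s => if !find_char short_str s then acc + 1 else acc) 0
    if diff_count > 1 then false else true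

-- ===== PORT B =====
def one_way_simple_alt (str1 : String) (str2 : String) : Bool :=
  let long_str := if PySem.Str.len str1 > PySem.Str.len str2 then str1 else str2
  let short_str := if PySem.Str.len str1 < PySem.Str.len str2 then str1 else str2
  if PySem.Str.len long_str - PySem.Str.len short_str > 1 then false
  else
    let matched : Int :=
      (PySem.Set.ofList short_str.toList).foldl
        (fun acc c => acc + (PySem.Str.count long_str (String.ofList [c]) : Int)) 0
    decide (PySem.Str.len long_str - matched ≤ 1)

-- ===== PRECONDITION & SPEC =====
def Spec_one_way_simple (str1 : String) (str2 : String) (out : Bool) : Prop := out = one_way_simple_alt str1 str2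
instance (str1 : String) (str2 : String) (out : Bool) : Decidable (Spec_one_way_simple str1 str2 out) := by unfold Spec_one_way_simple; infer_instance

-- ===== CLAIM (what is proved, stated in full; the proofs are below) =====
def Claim_equal_one_way_simple : Prop := ∀ (str1 : String) (str2 : String), Dom_one_way_simple str1 str2 → Spec_one_way_simple str1 str2 (one_way_simple str1 str2)

-- ===== LEMMAS AND PROOFS =====

-- find_char is membership in the string's characters
theorem find_char_go_eq (l : List Char) (c : Char) : find_char_go l c = l.contains c := by
  induction l with
  | nil => rfl
  | cons x xs ih =>
    by_cases h : x = c
    · subst h; simp [find_char_go]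
    · have hb : (x == c) = false := beq_false_of_ne h
      simp [find_char_go, hb, ih, Ne.symm h]

-- Python's str.count with a single-character pattern is List.count
theorem count_go_singleton (c : Char) (l : List Char) (fuel acc : Nat)
    (h : l.length ≤ fuel) :
    PySem.Chars.count.go [c] fuel l acc = acc + l.count c := by
  induction l generalizing fuel acc with
  | nil => cases fuel <;> simp [PySem.Chars.count.go]
  | cons x t ih =>
    cases fuel with
    | zero => simp at h
    | succ fuel =>
      have h' : t.length ≤ fuel := by simpa using h
      by_cases hx : x = c
      · subst hx
        have hp : List.isPrefixOf [x] (x :: t) = true := by simp [List.isPrefixOf]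
        simp only [PySem.Chars.count.go, hp, if_pos rfl, List.length_singleton, List.drop_one,
          List.tail_cons]
        rw [ih fuel (acc + 1) h']
        simp [List.count_cons]
        omega
      · have hp : List.isPrefixOf [c] (x :: t) = false := by
          simp [List.isPrefixOf, beq_false_of_ne (Ne.symm hx)]
        simp only [PySem.Chars.count.go, hp]
        rw [if_neg (by simp [hp]), ih fuel acc h']
        simp [List.count_cons, beq_false_of_ne hx]

theorem count_singleton (s : String) (c : Char) :
    PySem.Str.count s (String.ofList [c]) = s.toList.count c := by
  rw [PySem.Str.count_eq]
  have h0 : (String.ofList [c]).toList = [c] := by simp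
  rw [h0]
  have : PySem.Chars.count s.toList [c] = PySem.Chars.count.go [c] s.toList.length s.toList 0 := by
    simp [PySem.Chars.count]
  rw [this, count_go_singleton c s.toList s.toList.length 0 le_rfl]
  simp

-- summing counts with an accumulator is a sum over the mapped list
theorem foldl_add_count (K : List Char) (L : List Char) (a : Int) :
    K.foldl (fun acc c => acc + (L.count c : Int)) a
      = a + (K.map (fun c => (L.count c : Int))).sum := by
  induction K generalizing a with
  | nil => simp
  | cons k K ih => simp [ih]; ring

theorem delta_sum (M : List Char) (hM : M.Nodup) (x : Char) :
    (M.map (fun k => if k == x then (1 : Int) else 0)).sum = if x ∈ M then 1 else 0 := by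
  induction M with
  | nil => simp
  | cons m M ih =>
    rcases List.nodup_cons.mp hM with ⟨hm, hM'⟩
    by_cases h : m = x
    · subst h
      rw [List.map_cons, List.sum_cons, ih hM']
      simp [hm]
    · have hb : (m == x) = false := beq_false_of_ne h
      rw [List.map_cons, List.sum_cons, ih hM']
      simp [hb, Ne.symm h]

-- the sum of counts over a nodup key list equals the number of positions whose char is a key
theorem sum_counts_eq_countP_mem (K : List Char) (hK : K.Nodup) (L : List Char) :
    (K.map (fun k => (L.count k : Int))).sum = (L.countP (fun x => K.contains x) : Int) := by
  induction L with
  | nil => simp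
  | cons x L ih =>
    have hcast : (fun k => (((x :: L).count k : Nat) : Int))
        = fun k => ((L.count k : Nat) : Int) + (if k == x then (1 : Int) else 0) := by
      funext k
      by_cases h : k = x
      · simp [List.count_cons, h]
      · have hb : (k == x) = false := beq_false_of_ne h
        simp [List.count_cons, hb]
        exact fun hh => h hh.symm
    rw [hcast, PySem.List.sum_map_add_int, ih, delta_sum _ hK x]
    by_cases hx : x ∈ K
    · simp [List.countP_cons, hx]
    · simp [List.countP_cons, hx]

-- the two missing-position counts are complements through the string's length
theorem core_eq (long short : String) :
    (if (long.toList.foldl (fun acc s => if !find_char short s then acc + 1 else acc) (0 : Int)) > 1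
       then false else true)
    = decide (PySem.Str.len long -
        (PySem.Set.ofList short.toList).foldl
          (fun acc c => acc + (PySem.Str.count long (String.ofList [c]) : Int)) 0 ≤ 1) := by
  have hcnt : ∀ c, PySem.Str.count long (String.ofList [c]) = long.toList.count c :=
    fun c => count_singleton long c
  simp only [hcnt]
  rw [foldl_add_count, sum_counts_eq_countP_mem _ (PySem.Set.nodup_ofList _) long.toList,
    PySem.List.foldl_count_if]
  have hfc : (fun s => !find_char short s)
      = fun x => !((PySem.Set.ofList short.toList).contains x) := by
    funext s
    rw [find_char, find_char_go_eq]
    by_cases h : s ∈ short.toList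
    · simp [h, (PySem.Set.mem_ofList _ _).mpr h]
    · have h2 : s ∉ PySem.Set.ofList short.toList := fun hc => h ((PySem.Set.mem_ofList _ _).mp hc)
      simp [h, h2]
  rw [hfc]
  have hsplit : long.toList.length
      = long.toList.countP (fun x => ((PySem.Set.ofList short.toList).contains x))
        + long.toList.countP (fun x => !((PySem.Set.ofList short.toList).contains x)) := by
    simpa using List.length_eq_countP_add_countP
      (fun x => ((PySem.Set.ofList short.toList).contains x)) (l := long.toList)
  have hlen : PySem.Str.len long = (long.toList.length : Int) := by
    simp [PySem.Str.len]
  have hs' : (long.toList.length : Int)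
      = (long.toList.countP (fun x => ((PySem.Set.ofList short.toList).contains x)) : Int)
        + (long.toList.countP (fun x => !((PySem.Set.ofList short.toList).contains x)) : Int) := by
    exact_mod_cast hsplit
  rw [hlen]
  by_cases h : 0 + (long.toList.countP (fun x => !((PySem.Set.ofList short.toList).contains x)) : Int) > 1
  · rw [if_pos h]
    have hn : ¬ ((long.toList.length : Int) -
        (0 + (long.toList.countP (fun x => ((PySem.Set.ofList short.toList).contains x)) : Int)) ≤ 1) := by
      omega
    exact (decide_eq_false hn).symm
  · rw [if_neg h]
    have hy : (long.toList.length : Int) -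
        (0 + (long.toList.countP (fun x => ((PySem.Set.ofList short.toList).contains x)) : Int)) ≤ 1 := by
      omega
    exact (decide_eq_true hy).symm

-- the two function bodies agree for any long/short selection
theorem body_eq (long short : String) :
    (if PySem.Str.len long - PySem.Str.len short > 1 then false
     else if (long.toList.foldl (fun acc s => if !find_char short s then acc + 1 else acc) (0 : Int)) > 1
       then false else true)
    = (if PySem.Str.len long - PySem.Str.len short > 1 then false
       else decide (PySem.Str.len long -
          (PySem.Set.ofList short.toList).foldl
            (fun acc c => acc + (PySem.Str.count long (String.ofList [c]) : Int)) 0 ≤ 1)) := by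
  split
  · rfl
  · exact core_eq long short

-- ===== VERDICT (by name: the statement is the Claim_ definition above) =====
theorem one_way_simple_spec : Claim_equal_one_way_simple := by
  intro str1 str2 _
  unfold Spec_one_way_simple one_way_simple one_way_simple_alt
  exact body_eq _ _
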